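-- pv_equiv track=rewrite | github.com/arindhimar/BluePineapple | Python Programs/12-01-26/166.py | count_even_xor_pairs
-- ===== SOURCE A (Python) =====
-- def count_even_xor_pairs(arr):
--     count = 0
--     n = len(arr)
--     for i in range(n):
--         for j in range(i + 1, n):
--             if (arr[i] ^ arr[j]) % 2 == 0:
--                 count += 1
--     return count
-- ===== SOURCE B (Python) =====
-- def count_even_xor_pairs(arr):
--     e = 0
--     for x in arr:
--         if x % 2 == 0:
--             e += 1
--     o = len(arr) - e
--     return e * (e - 1) // 2 + o * (o - 1) // 2
-- ===== Notes on version B (the rewrite author's own statement) =====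
-- stated objective: faster
-- what changed: Replaced the quadratic all-pairs xor-parity scan with one pass counting evens and odds and the closed form C(e,2)+C(o,2).
import Mathlib
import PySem

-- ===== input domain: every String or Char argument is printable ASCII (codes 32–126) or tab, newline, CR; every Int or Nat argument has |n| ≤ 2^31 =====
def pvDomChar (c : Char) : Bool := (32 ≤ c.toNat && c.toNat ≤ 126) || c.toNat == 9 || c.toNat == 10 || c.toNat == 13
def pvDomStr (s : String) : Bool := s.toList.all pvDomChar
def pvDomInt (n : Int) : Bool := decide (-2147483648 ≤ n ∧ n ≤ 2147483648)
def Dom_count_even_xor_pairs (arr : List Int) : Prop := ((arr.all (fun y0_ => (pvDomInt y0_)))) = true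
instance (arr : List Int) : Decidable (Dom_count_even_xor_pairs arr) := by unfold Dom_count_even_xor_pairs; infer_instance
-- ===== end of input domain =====

-- B replaces A's quadratic all-pairs xor-parity scan by one pass counting evens and odds plus the closed form C(e,2)+C(o,2) (faster, asymptotic).


-- ===== PORT A =====
def count_even_xor_pairs (arr : List Int) : Int :=
  let count : Int := 0
  let n : Int := PySem.List.len arr
  (PySem.List.pyRange 0 n 1).foldl (fun count i =>
    (PySem.List.pyRange (i + 1) n 1).foldl (fun count j =>
      if PySem.Int.mod (PySem.Int.bxor (PySem.List.pyGetD arr i 0) (PySem.List.pyGetD arr j 0)) 2 = 0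
      then count + 1 else count) count) count

-- ===== PORT B =====
def count_even_xor_pairs_alt (arr : List Int) : Int :=
  let e : Int := arr.foldl (fun e x => if PySem.Int.mod x 2 = 0 then e + 1 else e) 0
  let o : Int := PySem.List.len arr - e
  PySem.Int.floordiv (e * (e - 1)) 2 + PySem.Int.floordiv (o * (o - 1)) 2

-- ===== PRECONDITION & SPEC =====
def Spec_count_even_xor_pairs (arr : List Int) (out : Int) : Prop := out = count_even_xor_pairs_alt arr
instance (arr : List Int) (out : Int) : Decidable (Spec_count_even_xor_pairs arr out) := by unfold Spec_count_even_xor_pairs; infer_instance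

-- ===== CLAIM (what is proved, stated in full; the proofs are below) =====
def Claim_equal_count_even_xor_pairs : Prop := ∀ (arr : List Int), Dom_count_even_xor_pairs arr → Spec_count_even_xor_pairs arr (count_even_xor_pairs arr)

-- ===== LEMMAS AND PROOFS =====

-- the low bit of a Nat xor is the sum of the low bits
theorem pvNatXorParity (m n : Nat) : (m ^^^ n) % 2 = (m + n) % 2 := by
  have := Nat.testBit_xor m n 0
  simp [Nat.testBit_zero] at this
  rcases Nat.mod_two_eq_zero_or_one m with h | h <;> rcases Nat.mod_two_eq_zero_or_one n with h' | h' <;>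
    simp [h, h'] at this ⊢

-- the Python test (x ^ y) % 2 == 0 is exactly "x and y have the same parity"
theorem pvBxorParity (x y : Int) :
    (PySem.Int.mod (PySem.Int.bxor x y) 2 = 0) ↔ (PySem.Int.mod x 2 = PySem.Int.mod y 2) := by
  rw [PySem.Int.mod_eq_emod_of_pos (by norm_num), PySem.Int.mod_eq_emod_of_pos (a := x) (by norm_num),
      PySem.Int.mod_eq_emod_of_pos (a := y) (by norm_num)]
  unfold PySem.Int.bxor
  split_ifs <;>
  · first
    | (have h := pvNatXorParity x.toNat y.toNat; omega)
    | (have h := pvNatXorParity x.toNat (-y - 1).toNat; omega)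
    | (have h := pvNatXorParity (-x - 1).toNat y.toNat; omega)
    | (have h := pvNatXorParity (-x - 1).toNat (-y - 1).toNat; omega)

-- structural form of A's double loop: each element paired with the same-parity elements after it
def pvPairCount : List Int → Int
  | [] => 0
  | x :: xs => (xs.countP (fun y => PySem.Int.mod (PySem.Int.bxor x y) 2 = 0) : Int) + pvPairCount xs

-- number of even elements, as a Nat
def pvE (xs : List Int) : Nat := xs.countP (fun x => PySem.Int.mod x 2 = 0)

-- the contribution of outer index k in A's loop
def pvG (arr : List Int) (k : Nat) : Int :=
  ((arr.drop (k + 1)).countP (fun y => PySem.Int.mod (PySem.Int.bxor (arr.getD k 0) y) 2 = 0) : Int)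

-- A's double index loop is the sum over k of the same-parity count in the tail after k
theorem pvA_sum (arr : List Int) :
    count_even_xor_pairs arr = ((List.range arr.length).map (pvG arr)).sum := by
  unfold count_even_xor_pairs
  simp only [PySem.List.len_eq]
  rw [PySem.List.pyRange_one 0 (arr.length : Int), List.foldl_map]
  simp only [sub_zero, Int.toNat_natCast, zero_add]
  have hstep : (fun (c : Int) (k : Nat) =>
      (PySem.List.pyRange ((k : Int) + 1) (arr.length : Int) 1).foldl (fun count j =>
        if PySem.Int.mod (PySem.Int.bxor (PySem.List.pyGetD arr (k : Int) 0) (PySem.List.pyGetD arr j 0)) 2 = 0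
        then count + 1 else count) c)
      = fun (c : Int) (k : Nat) => c + pvG arr k := by
    funext c k
    rw [PySem.List.foldl_pyRange_pyGetD' arr 0
      (fun c y => if PySem.Int.mod (PySem.Int.bxor (PySem.List.pyGetD arr (k : Int) 0) y) 2 = 0 then c + 1 else c)
      c (a := (k : Int) + 1) (by positivity)]
    have ht : ((k : Int) + 1).toNat = k + 1 := by omega
    rw [ht, PySem.List.pyGetD_natCast]
    have h := PySem.List.foldl_count_if
      (fun y => decide (PySem.Int.mod (PySem.Int.bxor (arr.getD k 0) y) 2 = 0)) (arr.drop (k + 1)) c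
    simpa [pvG] using h
  rw [hstep, PySem.List.foldl_add, zero_add]

-- that sum is pvPairCount, by structural induction
theorem pvSum_range (arr : List Int) :
    ((List.range arr.length).map (pvG arr)).sum = pvPairCount arr := by
  induction arr with
  | nil => rfl
  | cons x xs ih =>
    rw [List.length_cons, List.range_succ_eq_map, List.map_cons, List.map_map, List.sum_cons]
    have hshift : pvG (x :: xs) ∘ Nat.succ = pvG xs := by
      funext k
      simp [pvG]
    rw [hshift, ih]
    have h0 : pvG (x :: xs) 0 = (xs.countP (fun y => PySem.Int.mod (PySem.Int.bxor x y) 2 = 0) : Int) := by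
      simp [pvG]
    rw [h0, pvPairCount]

-- count of odd elements = length minus count of evens
theorem pvOddCount (xs : List Int) :
    xs.countP (fun y => PySem.Int.mod y 2 = 1) = xs.length - pvE xs := by
  induction xs with
  | nil => rfl
  | cons z zs ih =>
    have hle : pvE zs ≤ zs.length := List.countP_le_length
    simp only [pvE, List.countP_cons, List.length_cons] at ih ⊢
    rcases PySem.Int.mod_two_eq z with hz | hz
    · have hq : (decide (PySem.Int.mod z 2 = 1)) = false := by rw [hz]; decide
      have hp : (decide (PySem.Int.mod z 2 = 0)) = true := by rw [hz]; decide
      rw [hq, hp]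
      simp only [Bool.false_eq_true, if_false, if_true]
      have hdef : pvE zs = zs.countP (fun x => decide (PySem.Int.mod x 2 = 0)) := rfl
      omega
    · have hq : (decide (PySem.Int.mod z 2 = 1)) = true := by rw [hz]; decide
      have hp : (decide (PySem.Int.mod z 2 = 0)) = false := by rw [hz]; decide
      rw [hq, hp]
      simp only [Bool.false_eq_true, if_false, if_true]
      have hdef : pvE zs = zs.countP (fun x => decide (PySem.Int.mod x 2 = 0)) := rfl
      omega

-- the same-parity count against a fixed x is the even or the odd count
theorem pvCount_same (x : Int) (xs : List Int) :
    xs.countP (fun y => PySem.Int.mod (PySem.Int.bxor x y) 2 = 0)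
      = if PySem.Int.mod x 2 = 0 then pvE xs else xs.length - pvE xs := by
  have hc : xs.countP (fun y => PySem.Int.mod (PySem.Int.bxor x y) 2 = 0)
      = xs.countP (fun y => PySem.Int.mod y 2 = PySem.Int.mod x 2) := by
    apply List.countP_congr
    intro y _
    simp only [decide_eq_true_eq]
    rw [pvBxorParity]
    exact eq_comm
  rw [hc]
  rcases PySem.Int.mod_two_eq x with h | h <;> rw [h]
  · rw [if_pos rfl]
    rfl
  · rw [if_neg (by norm_num)]
    exact pvOddCount xs

-- pvPairCount in closed form: C(e,2) + C(o,2)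
theorem pvPairCount_closed (arr : List Int) :
    pvPairCount arr = (Nat.choose (pvE arr) 2 : Int) + (Nat.choose (arr.length - pvE arr) 2 : Int) := by
  induction arr with
  | nil => rfl
  | cons x xs ih =>
    have hle : pvE xs ≤ xs.length := List.countP_le_length
    rw [pvPairCount, ih, pvCount_same]
    have hE : pvE (x :: xs) = pvE xs + (if PySem.Int.mod x 2 = 0 then 1 else 0) := by
      simp only [pvE, List.countP_cons]
      by_cases hx : PySem.Int.mod x 2 = 0
      · rw [if_pos hx, if_pos]; rw [hx]; decide
      · rw [if_neg hx, if_neg]; intro hcon; exact hx (of_decide_eq_true hcon)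
    rcases PySem.Int.mod_two_eq x with h | h
    · have hx0 : PySem.Int.mod x 2 = 0 := h
      rw [if_pos hx0, hE, if_pos hx0]
      have h1 : (pvE xs + 1).choose 2 = pvE xs + (pvE xs).choose 2 := by
        simpa using Nat.choose_succ_succ' (pvE xs) 1
      have h2 : (x :: xs).length - (pvE xs + 1) = xs.length - pvE xs := by
        simp only [List.length_cons]; omega
      rw [h1, h2]
      push_cast
      ring
    · have hx1 : ¬ PySem.Int.mod x 2 = 0 := by rw [h]; norm_num
      rw [if_neg hx1, hE, if_neg hx1]
      have h2 : (x :: xs).length - (pvE xs + 0) = (xs.length - pvE xs) + 1 := by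
        simp only [List.length_cons]; omega
      have h1 : ((xs.length - pvE xs) + 1).choose 2 = (xs.length - pvE xs) + (xs.length - pvE xs).choose 2 := by
        simpa using Nat.choose_succ_succ' (xs.length - pvE xs) 1
      rw [h2, h1]
      simp only [Nat.add_zero]
      push_cast
      omega

-- C(m,2) as Python floor division
theorem pvChoose2 (m : Nat) : (Nat.choose m 2 : Int) = PySem.Int.floordiv ((m : Int) * ((m : Int) - 1)) 2 := by
  rw [PySem.Int.floordiv_eq_ediv_of_pos (by norm_num)]
  cases m with
  | zero => decide
  | succ k =>
    rw [Nat.choose_two_right]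
    push_cast [Nat.succ_sub_one]
    congr 1
    ring

-- B computes the same closed form
theorem pvB_closed (arr : List Int) :
    count_even_xor_pairs_alt arr = (Nat.choose (pvE arr) 2 : Int) + (Nat.choose (arr.length - pvE arr) 2 : Int) := by
  have hle : pvE arr ≤ arr.length := List.countP_le_length
  have hfold : arr.foldl (fun e x => if PySem.Int.mod x 2 = 0 then e + 1 else e) 0 = (pvE arr : Int) := by
    have h := PySem.List.foldl_count_if (fun x => decide (PySem.Int.mod x 2 = 0)) arr 0
    simpa [pvE] using h
  show (let e : Int := arr.foldl (fun e x => if PySem.Int.mod x 2 = 0 then e + 1 else e) 0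
        let o : Int := PySem.List.len arr - e
        PySem.Int.floordiv (e * (e - 1)) 2 + PySem.Int.floordiv (o * (o - 1)) 2) = _
  simp only [hfold, PySem.List.len_eq]
  have ho : (arr.length : Int) - (pvE arr : Int) = ((arr.length - pvE arr : Nat) : Int) := by omega
  rw [ho, pvChoose2, pvChoose2]

-- ===== VERDICT (by name: the statement is the Claim_ definition above) =====
theorem count_even_xor_pairs_spec : Claim_equal_count_even_xor_pairs := by
  intro arr _
  unfold Spec_count_even_xor_pairs
  rw [pvA_sum, pvSum_range, pvPairCount_closed, pvB_closed]
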